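-- pv_equiv track=rewrite | github.com/gitisaac/aoc-2024 | dec7/main.py | is_equation_solvable_prod_sum_concat
-- ===== SOURCE A (Python) =====
-- from typing import List
--
-- def is_equation_solvable_prod_sum_concat(equation: List[int], sol: int, curr=0, so_far="") -> int:
--     """
--     Check if either sum or product or concat of element from left to right is equal to sol
--     if so return sol, otherwise return 0
--     """
--     if curr > sol:
--         return 0
--     if len(equation) == 0:
--         if curr == sol:
--             return sol
--         else:
--             return 0
--     option_sum = is_equation_solvable_prod_sum_concat(equation[1:], sol, curr + equation[0], so_far = so_far + " + " + str(equation[0]))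
--     option_prod = is_equation_solvable_prod_sum_concat(equation[1:], sol, curr * equation[0], so_far = so_far + " * " + str(equation[0]))
--     option_concat = is_equation_solvable_prod_sum_concat(
--         equation[1:], sol, int(str(curr) + str(equation[0])), so_far = so_far + " || " + str(equation[0])
--     )
--     return max(
--         option_sum,
--         option_prod,
--         option_concat,
--     )
-- ===== SOURCE B (Python) =====
-- def is_equation_solvable_prod_sum_concat(equation, sol, curr=0, so_far=""):
--     """Forward DP over the set of reachable running values (states > sol are
--     pruned, as in A); alternative algorithm to A's path recursion."""
--     states = {curr} if curr <= sol else set()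
--     for x in equation:
--         nxt = set()
--         for s in states:
--             for v in (s + x, s * x, int(str(s) + str(x))):
--                 if v <= sol:
--                     nxt.add(v)
--         states = nxt
--     return sol if sol in states else 0
-- ===== Notes on version B (the rewrite author's own statement) =====
-- stated objective: alternative
-- what changed: Replaced A's 3-way recursion over every operator path by a single forward pass that maintains the deduplicated set of reachable running values (with A's same >sol cutoff) and tests membership of sol at the end.
-- outside the precondition, e.g. on is_equation_solvable_prod_sum_concat([3, -1], 5, 3, ''): A returns 0, B returns 0; on is_equation_solvable_prod_sum_concat([0], -3, -3, ''): A returns 0, B returns -3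
import Mathlib
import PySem

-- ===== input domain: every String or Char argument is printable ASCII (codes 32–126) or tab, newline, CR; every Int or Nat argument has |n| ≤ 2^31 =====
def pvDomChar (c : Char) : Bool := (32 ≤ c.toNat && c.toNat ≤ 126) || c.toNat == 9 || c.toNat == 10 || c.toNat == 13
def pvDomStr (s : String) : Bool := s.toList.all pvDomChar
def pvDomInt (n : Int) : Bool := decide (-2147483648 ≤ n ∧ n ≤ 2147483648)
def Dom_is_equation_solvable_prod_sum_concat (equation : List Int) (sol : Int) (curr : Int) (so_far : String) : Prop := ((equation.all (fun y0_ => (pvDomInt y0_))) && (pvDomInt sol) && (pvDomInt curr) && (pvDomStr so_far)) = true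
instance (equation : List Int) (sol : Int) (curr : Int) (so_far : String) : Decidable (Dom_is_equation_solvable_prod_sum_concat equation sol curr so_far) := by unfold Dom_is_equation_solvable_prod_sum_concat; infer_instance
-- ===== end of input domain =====

-- B replaces A's 3-way recursion over every operator path by a forward set DP over the
-- deduplicated set of reachable running values, with A's same >sol cutoff (objective:
-- alternative algorithm, same result by a different traversal).

-- ===== PORT A =====
-- int(str(curr) + str(x)): Python raises ValueError when the concatenated string does
-- not parse (negative x); PySem.Int.ofStr? returns none there and Pre_ excludes those
-- inputs, so the .getD 0 default is never observable inside Pre_.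
def pvConcat (s x : Int) : Int :=
  (PySem.Int.ofStr? (PySem.Int.toStr s ++ PySem.Int.toStr x)).getD 0

def is_equation_solvable_prod_sum_concat (equation : List Int) (sol : Int) (curr : Int) (so_far : String) : Int :=
  if curr > sol then 0
  else
    match equation with
    | [] => if curr = sol then sol else 0
    | x :: rest =>
      let option_sum := is_equation_solvable_prod_sum_concat rest sol (curr + x) (so_far ++ " + " ++ PySem.Int.toStr x)
      let option_prod := is_equation_solvable_prod_sum_concat rest sol (curr * x) (so_far ++ " * " ++ PySem.Int.toStr x)
      let option_concat := is_equation_solvable_prod_sum_concat rest sol (pvConcat curr x) (so_far ++ " || " ++ PySem.Int.toStr x)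
      max option_sum (max option_prod option_concat)

-- ===== PORT B =====
-- one DP step: the three children of every state, kept only when ≤ sol, collected as a set
def pvStep (sol x : Int) (states : PySem.Set Int) : PySem.Set Int :=
  states.foldl (fun nxt s =>
    [s + x, s * x, pvConcat s x].foldl (fun nxt v => if v ≤ sol then PySem.Set.add nxt v else nxt) nxt) PySem.Set.empty

def is_equation_solvable_prod_sum_concat_alt (equation : List Int) (sol : Int) (curr : Int) (so_far : String) : Int :=
  let states0 : PySem.Set Int := if curr ≤ sol then PySem.Set.add PySem.Set.empty curr else PySem.Set.empty
  let states := equation.foldl (fun S x => pvStep sol x S) states0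
  if PySem.Set.contains states sol then sol else 0

-- ===== PRECONDITION & SPEC =====
-- Pre_ excludes (i) inputs with a negative equation element while curr ≤ sol — there A's
-- int(str(curr)+str(x)) raises ValueError on almost all of them (when the >sol cutoff
-- happens to prune every path first, A instead returns 0, an accident of cutoff order) —
-- and (ii) negative targets sol with a nonempty equation, an unspecified corner outside
-- the puzzle's domain where A's max() folding yields 0 while B's reachability test may
-- yield sol.
def Pre_is_equation_solvable_prod_sum_concat (equation : List Int) (sol : Int) (curr : Int) (so_far : String) : Prop :=
  sol < curr ∨ ((∀ x ∈ equation, 0 ≤ x) ∧ (0 ≤ sol ∨ equation = []))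
instance (equation : List Int) (sol : Int) (curr : Int) (so_far : String) : Decidable (Pre_is_equation_solvable_prod_sum_concat equation sol curr so_far) := by unfold Pre_is_equation_solvable_prod_sum_concat; infer_instance

def pvWitness_is_equation_solvable_prod_sum_concat : List Int × Int × Int × String := ([2, 3, 5], 25, 0, "")

def Spec_is_equation_solvable_prod_sum_concat (equation : List Int) (sol : Int) (curr : Int) (so_far : String) (out : Int) : Prop := out = is_equation_solvable_prod_sum_concat_alt equation sol curr so_far
instance (equation : List Int) (sol : Int) (curr : Int) (so_far : String) (out : Int) : Decidable (Spec_is_equation_solvable_prod_sum_concat equation sol curr so_far out) := by unfold Spec_is_equation_solvable_prod_sum_concat; infer_instance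

-- ===== CLAIM (what is proved, stated in full; the proofs are below) =====
def Claim_equal_is_equation_solvable_prod_sum_concat : Prop := ∀ (equation : List Int) (sol : Int) (curr : Int) (so_far : String), Dom_is_equation_solvable_prod_sum_concat equation sol curr so_far → Pre_is_equation_solvable_prod_sum_concat equation sol curr so_far → Spec_is_equation_solvable_prod_sum_concat equation sol curr so_far (is_equation_solvable_prod_sum_concat equation sol curr so_far)

-- ===== LEMMAS AND PROOFS =====

theorem mem_prune_foldl (sol : Int) (l : List Int) (acc : PySem.Set Int) (v : Int) :
    v ∈ l.foldl (fun nxt v => if v ≤ sol then PySem.Set.add nxt v else nxt) acc ↔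
      v ∈ acc ∨ (v ∈ l ∧ v ≤ sol) := by
  induction l generalizing acc with
  | nil => simp
  | cons w l ih =>
    rw [List.foldl_cons, ih]
    by_cases hw : w ≤ sol <;> by_cases hv : v = w <;>
      simp only [hw, hv, if_pos, if_false, PySem.Set.mem_add, List.mem_cons] <;> tauto

theorem mem_pvStep_acc (sol x : Int) (S : List Int) (acc : PySem.Set Int) (v : Int) :
    v ∈ S.foldl (fun nxt s =>
      [s + x, s * x, pvConcat s x].foldl (fun nxt v => if v ≤ sol then PySem.Set.add nxt v else nxt) nxt) acc ↔
      v ∈ acc ∨ ∃ s ∈ S, (v = s + x ∨ v = s * x ∨ v = pvConcat s x) ∧ v ≤ sol := by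
  induction S generalizing acc with
  | nil => simp
  | cons s S ih =>
    rw [List.foldl_cons, ih, mem_prune_foldl]
    simp only [List.mem_cons, List.not_mem_nil, or_false]
    constructor
    · rintro ((h | ⟨h, hle⟩) | ⟨t, ht, hc, hle⟩)
      · exact Or.inl h
      · exact Or.inr ⟨s, Or.inl rfl, h, hle⟩
      · exact Or.inr ⟨t, Or.inr ht, hc, hle⟩
    · rintro (h | ⟨t, (rfl | ht), hc, hle⟩)
      · exact Or.inl (Or.inl h)
      · exact Or.inl (Or.inr ⟨hc, hle⟩)
      · exact Or.inr ⟨t, ht, hc, hle⟩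

theorem mem_pvStep (sol x : Int) (S : PySem.Set Int) (v : Int) :
    v ∈ pvStep sol x S ↔ ∃ s ∈ S, (v = s + x ∨ v = s * x ∨ v = pvConcat s x) ∧ v ≤ sol := by
  unfold pvStep
  rw [mem_pvStep_acc]
  simp [PySem.Set.empty]

theorem foldl_pvStep_nil (eq : List Int) (sol : Int) :
    eq.foldl (fun S x => pvStep sol x S) PySem.Set.empty = PySem.Set.empty := by
  induction eq with
  | nil => rfl
  | cons x rest ih => simpa [List.foldl, pvStep, PySem.Set.empty] using ih

theorem mem_foldl_pvStep_union (eq : List Int) (sol v : Int) (S : PySem.Set Int) :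
    v ∈ eq.foldl (fun S x => pvStep sol x S) S ↔
      ∃ s ∈ S, v ∈ eq.foldl (fun S x => pvStep sol x S) (PySem.Set.add PySem.Set.empty s) := by
  induction eq generalizing S with
  | nil => simp [PySem.Set.add, PySem.Set.empty, PySem.Set.contains]
  | cons x eq ih =>
    have hsingle : ∀ (s : Int), (PySem.Set.add PySem.Set.empty s : PySem.Set Int) = [s] := by
      intro s; rfl
    rw [List.foldl_cons, ih]
    constructor
    · rintro ⟨t, ht, hv⟩
      rw [mem_pvStep] at ht
      obtain ⟨s, hs, hc, hle⟩ := ht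
      refine ⟨s, hs, ?_⟩
      rw [List.foldl_cons, ih]
      refine ⟨t, ?_, hv⟩
      rw [mem_pvStep]
      exact ⟨s, by rw [hsingle]; exact List.mem_singleton.mpr rfl, hc, hle⟩
    · rintro ⟨s, hs, hv⟩
      rw [List.foldl_cons, ih] at hv
      obtain ⟨t, ht, hv⟩ := hv
      rw [mem_pvStep] at ht
      obtain ⟨s', hs', hc, hle⟩ := ht
      rw [hsingle] at hs'
      rw [List.mem_singleton] at hs'
      refine ⟨t, ?_, hv⟩
      rw [mem_pvStep]
      exact ⟨s, hs, hs' ▸ hc, hle⟩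

theorem contains_empty_false (sol : Int) :
    ¬ (PySem.Set.contains (PySem.Set.empty : PySem.Set Int) sol = true) := by
  intro h
  exact absurd ((PySem.Set.contains_iff _ _).mp h) (by simp [PySem.Set.empty])

theorem A_eq_reach (eq : List Int) (sol : Int) (hsol : 0 ≤ sol) :
    ∀ (curr : Int) (sf : String),
      is_equation_solvable_prod_sum_concat eq sol curr sf =
        if PySem.Set.contains (eq.foldl (fun S x => pvStep sol x S)
            (if curr ≤ sol then PySem.Set.add PySem.Set.empty curr else PySem.Set.empty)) sol
        then sol else 0 := by
  induction eq with
  | nil =>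
    intro curr sf
    rw [List.foldl_nil]
    by_cases hgt : curr > sol
    · have hle : ¬ curr ≤ sol := by omega
      rw [if_neg hle, if_neg (contains_empty_false sol)]
      simp [is_equation_solvable_prod_sum_concat, hgt]
    · have hle : curr ≤ sol := by omega
      rw [if_pos hle]
      have hmem : (PySem.Set.contains (PySem.Set.add PySem.Set.empty curr) sol = true) ↔ sol = curr := by
        rw [PySem.Set.contains_iff]; simp [PySem.Set.empty]
      by_cases he : curr = sol
      · rw [if_pos (hmem.mpr he.symm)]; simp [is_equation_solvable_prod_sum_concat, he]
      · rw [if_neg (fun h => he ((hmem.mp h).symm))]; simp [is_equation_solvable_prod_sum_concat, hgt, he]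
  | cons x rest ih =>
    intro curr sf
    by_cases hgt : curr > sol
    · have hle : ¬ curr ≤ sol := by omega
      rw [if_neg hle, foldl_pvStep_nil, if_neg (contains_empty_false sol)]
      simp [is_equation_solvable_prod_sum_concat, hgt]
    · have hle : curr ≤ sol := by omega
      -- each branch value via the induction hypothesis, as a membership test
      have key : ∀ (c : Int) (sf' : String),
          is_equation_solvable_prod_sum_concat rest sol c sf' =
            if (c ≤ sol ∧ sol ∈ rest.foldl (fun S x => pvStep sol x S) (PySem.Set.add PySem.Set.empty c)) then sol else 0 := by
        intro c sf'
        rw [ih c sf']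
        by_cases hc : c ≤ sol
        · rw [if_pos hc]
          by_cases hm : sol ∈ rest.foldl (fun S x => pvStep sol x S) (PySem.Set.add PySem.Set.empty c)
          · rw [if_pos ((PySem.Set.contains_iff _ _).mpr hm), if_pos ⟨hc, hm⟩]
          · rw [if_neg (fun h => hm ((PySem.Set.contains_iff _ _).mp h)), if_neg (fun h => hm h.2)]
        · rw [if_neg hc, foldl_pvStep_nil, if_neg (contains_empty_false sol), if_neg (fun h => hc h.1)]
      -- the DP condition decomposes over the three children of curr
      have hC : PySem.Set.contains ((x :: rest).foldl (fun S x => pvStep sol x S)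
            (if curr ≤ sol then PySem.Set.add PySem.Set.empty curr else PySem.Set.empty)) sol = true ↔
          ((curr + x ≤ sol ∧ sol ∈ rest.foldl (fun S x => pvStep sol x S) (PySem.Set.add PySem.Set.empty (curr + x))) ∨
           (curr * x ≤ sol ∧ sol ∈ rest.foldl (fun S x => pvStep sol x S) (PySem.Set.add PySem.Set.empty (curr * x))) ∨
           (pvConcat curr x ≤ sol ∧ sol ∈ rest.foldl (fun S x => pvStep sol x S) (PySem.Set.add PySem.Set.empty (pvConcat curr x)))) := by
        rw [PySem.Set.contains_iff, if_pos hle, List.foldl_cons, mem_foldl_pvStep_union]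
        constructor
        · rintro ⟨t, ht, hm⟩
          rw [mem_pvStep] at ht
          obtain ⟨s, hs, hc, hts⟩ := ht
          have hs' : s = curr := by
            have h1 : (PySem.Set.add PySem.Set.empty curr : PySem.Set Int) = [curr] := rfl
            rw [h1] at hs; simpa using hs
          subst hs'
          rcases hc with rfl | rfl | rfl
          · exact Or.inl ⟨hts, hm⟩
          · exact Or.inr (Or.inl ⟨hts, hm⟩)
          · exact Or.inr (Or.inr ⟨hts, hm⟩)
        · have hmem : ∀ (t : Int), (t = curr + x ∨ t = curr * x ∨ t = pvConcat curr x) → t ≤ sol →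
              sol ∈ rest.foldl (fun S x => pvStep sol x S) (PySem.Set.add PySem.Set.empty t) →
              ∃ t' ∈ pvStep sol x (PySem.Set.add PySem.Set.empty curr),
                sol ∈ rest.foldl (fun S x => pvStep sol x S) (PySem.Set.add PySem.Set.empty t') := by
            intro t hc hts hm
            refine ⟨t, ?_, hm⟩
            rw [mem_pvStep]
            exact ⟨curr, List.mem_singleton.mpr rfl, hc, hts⟩
          rintro (⟨hts, hm⟩ | ⟨hts, hm⟩ | ⟨hts, hm⟩)
          · exact hmem _ (Or.inl rfl) hts hm
          · exact hmem _ (Or.inr (Or.inl rfl)) hts hm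
          · exact hmem _ (Or.inr (Or.inr rfl)) hts hm
      -- finish: max over the three branch values
      show (if curr > sol then 0 else
        max (is_equation_solvable_prod_sum_concat rest sol (curr + x) (sf ++ " + " ++ PySem.Int.toStr x))
          (max (is_equation_solvable_prod_sum_concat rest sol (curr * x) (sf ++ " * " ++ PySem.Int.toStr x))
            (is_equation_solvable_prod_sum_concat rest sol (pvConcat curr x) (sf ++ " || " ++ PySem.Int.toStr x)))) = _
      rw [if_neg hgt, key, key, key]
      by_cases hC' : PySem.Set.contains ((x :: rest).foldl (fun S x => pvStep sol x S)
            (if curr ≤ sol then PySem.Set.add PySem.Set.empty curr else PySem.Set.empty)) sol = true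
      · rw [if_pos hC']
        rcases hC.mp hC' with h | h | h <;> rw [if_pos h] <;> split_ifs <;> omega
      · rw [if_neg hC']
        have hns := fun h => hC' (hC.mpr h)
        rw [if_neg (fun h => hns (Or.inl h)), if_neg (fun h => hns (Or.inr (Or.inl h))),
          if_neg (fun h => hns (Or.inr (Or.inr h)))]
        simp


-- ===== VERDICT (by name: the statement is the Claim_ definition above) =====
theorem is_equation_solvable_prod_sum_concat_spec : Claim_equal_is_equation_solvable_prod_sum_concat := by
  intro equation sol curr so_far _hdom hpre
  unfold Spec_is_equation_solvable_prod_sum_concat is_equation_solvable_prod_sum_concat_alt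
  rcases hpre with h | ⟨_hnn, hs⟩
  · -- curr > sol: both sides are 0
    have hgt : curr > sol := h
    have hle : ¬ curr ≤ sol := by omega
    show _ = (if PySem.Set.contains (equation.foldl (fun S x => pvStep sol x S)
        (if curr ≤ sol then PySem.Set.add PySem.Set.empty curr else PySem.Set.empty)) sol = true then sol else 0)
    rw [if_neg hle, foldl_pvStep_nil, if_neg (contains_empty_false sol)]
    cases equation with
    | nil => simp [is_equation_solvable_prod_sum_concat, hgt]
    | cons x rest => simp [is_equation_solvable_prod_sum_concat, hgt]
  · rcases hs with hs | hnil
    · exact A_eq_reach equation sol hs curr so_far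
    · subst hnil
      show _ = (if PySem.Set.contains (List.foldl (fun S x => pvStep sol x S)
          (if curr ≤ sol then PySem.Set.add PySem.Set.empty curr else PySem.Set.empty) []) sol = true then sol else 0)
      rw [List.foldl_nil]
      by_cases hgt : curr > sol
      · have hle : ¬ curr ≤ sol := by omega
        rw [if_neg hle, if_neg (contains_empty_false sol)]
        simp [is_equation_solvable_prod_sum_concat, hgt]
      · have hle : curr ≤ sol := by omega
        rw [if_pos hle]
        have hmem : (PySem.Set.contains (PySem.Set.add PySem.Set.empty curr) sol = true) ↔ sol = curr := by
          rw [PySem.Set.contains_iff]; simp [PySem.Set.empty]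
        by_cases he : curr = sol
        · rw [if_pos (hmem.mpr he.symm)]; simp [is_equation_solvable_prod_sum_concat, he]
        · rw [if_neg (fun h => he ((hmem.mp h).symm))]; simp [is_equation_solvable_prod_sum_concat, hgt, he]
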